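-- pv_equiv track=rewrite | github.com/prklVIP/PyLSS | pylss/chromanalysis.py | peaksplit
-- ===== SOURCE A (Python) =====
-- def peaksplit(signal):
--     """ Method to split the peaks identified by getPeask() """
--     peaklst = []
--     p = [] # peak
--     #pnlst = []
--     #pn = [] # number in peak
--     for i in range(len(signal)):
--         if signal[i][-1] > 0:
--             p.append(signal[i])
--             #pn.append(i)
--         else:
--             if len(p) > 0:
--             #    pnlst.append([])
--                 peaklst.append([])
--                 for row in p:
--                     peaklst[-1].append(row)
--             #    for row in pn:
--             #        pnlst[-1].append(row)
--                 del p[:]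
--             #    del pn[:]
--             else:
--                 continue
--
--     #TODO: Remove adjacet peaks within window size < k
--
--     return peaklst
-- ===== SOURCE B (Python) =====
-- def peaksplit(sig):
--     """ Split sig into peak groups via separator indices (rows with last value <= 0). """
--     negs = [i for i, r in enumerate(sig) if r[-1] <= 0]
--     peaklst = []
--     prev = 0
--     for n in negs:
--         seg = sig[prev:n]
--         if seg:
--             peaklst.append(list(seg))
--         prev = n + 1
--     return peaklst
-- ===== Notes on version B (the rewrite author's own statement) =====
-- stated objective: alternative
-- what changed: A's single stateful scan with a pending-run accumulator is replaced by a two-pass decomposition: first collect the separator indices (rows whose last value is <= 0), then slice the signal between consecutive separators, keeping non-empty slices.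
-- outside the precondition, e.g. on peaksplit([[1], []]): A raises IndexError, B raises IndexError
import Mathlib
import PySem

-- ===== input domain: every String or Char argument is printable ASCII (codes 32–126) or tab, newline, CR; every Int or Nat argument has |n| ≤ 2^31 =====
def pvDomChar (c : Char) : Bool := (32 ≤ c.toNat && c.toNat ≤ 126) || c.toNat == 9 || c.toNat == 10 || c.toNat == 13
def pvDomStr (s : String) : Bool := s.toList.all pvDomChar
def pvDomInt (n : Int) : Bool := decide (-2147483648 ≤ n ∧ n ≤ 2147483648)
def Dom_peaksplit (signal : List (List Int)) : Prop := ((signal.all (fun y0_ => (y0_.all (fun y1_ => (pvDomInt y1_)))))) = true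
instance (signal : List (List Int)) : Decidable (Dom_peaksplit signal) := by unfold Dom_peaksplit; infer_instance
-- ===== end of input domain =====

-- B replaces A's single accumulator scan by a two-pass decomposition (separator index list, then slices); same O(n) cost, alternative structure.

-- ===== PORT A =====
-- one iteration of A's for-loop: state = (peaklst, p)
def peaksplitStep (st : List (List (List Int)) × List (List Int)) (row : List Int) :
    List (List (List Int)) × List (List Int) :=
  if (PySem.List.pyGet? row (-1)).getD 0 > 0 then (st.1, st.2 ++ [row])
  else if st.2 ≠ [] then (st.1 ++ [st.2], []) else st

def peaksplit (signal : List (List Int)) : List (List (List Int)) :=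
  (signal.foldl peaksplitStep ([], [])).1

-- ===== PORT B =====
-- negs = [i for i, r in enumerate(signal) if r[-1] <= 0]
def pvNegIdxs (signal : List (List Int)) : List Int :=
  ((PySem.List.enumerate signal 0).filter
      (fun ir => decide ((PySem.List.pyGet? ir.2 (-1)).getD 0 ≤ 0))).map (fun ir => ir.1)

-- one iteration of B's for-loop over negs: state = (prev, peaklst)
def peaksplitAltStep (signal : List (List Int)) (st : Int × List (List (List Int))) (n : Int) :
    Int × List (List (List Int)) :=
  let seg := PySem.List.slice signal (some st.1) (some n)
  (n + 1, if seg ≠ [] then st.2 ++ [seg] else st.2)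

def peaksplit_alt (signal : List (List Int)) : List (List (List Int)) :=
  ((pvNegIdxs signal).foldl (peaksplitAltStep signal) ((0 : Int), [])).2

-- ===== PRECONDITION & SPEC =====
-- Pre_ excludes signals containing an empty row, on which Python A raises IndexError at row[-1].
def Pre_peaksplit (signal : List (List Int)) : Prop := ∀ row ∈ signal, row ≠ []
instance (signal : List (List Int)) : Decidable (Pre_peaksplit signal) := by unfold Pre_peaksplit; infer_instance
def pvWitness_peaksplit : List (List Int) := [[1], [2], [0], [3]]

def Spec_peaksplit (signal : List (List Int)) (out : List (List (List Int))) : Prop := out = peaksplit_alt signal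
instance (signal : List (List Int)) (out : List (List (List Int))) : Decidable (Spec_peaksplit signal out) := by unfold Spec_peaksplit; infer_instance

-- ===== CLAIM (what is proved, stated in full; the proofs are below) =====
def Claim_equal_peaksplit : Prop := ∀ (signal : List (List Int)), Dom_peaksplit signal → Pre_peaksplit signal → Spec_peaksplit signal (peaksplit signal)

-- ===== LEMMAS AND PROOFS =====

-- reference grouping function: pending run p, remaining rows
def pvGroups (p : List (List Int)) : List (List Int) → List (List (List Int))
  | [] => []
  | r :: rs =>
      if (PySem.List.pyGet? r (-1)).getD 0 > 0 then pvGroups (p ++ [r]) rs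
      else if p = [] then pvGroups [] rs else p :: pvGroups [] rs

-- local (Nat) separator positions
def pvNegs : List (List Int) → List Nat
  | [] => []
  | r :: rs =>
      if (PySem.List.pyGet? r (-1)).getD 0 > 0 then (pvNegs rs).map (· + 1)
      else 0 :: (pvNegs rs).map (· + 1)

theorem pvA_foldl (sig : List (List Int)) :
    ∀ (acc : List (List (List Int))) (p : List (List Int)),
      (sig.foldl peaksplitStep (acc, p)).1 = acc ++ pvGroups p sig := by
  induction sig with
  | nil => intro acc p; simp [pvGroups]
  | cons r rs ih =>
      intro acc p
      simp only [List.foldl_cons, peaksplitStep, pvGroups]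
      by_cases h : (PySem.List.pyGet? r (-1)).getD 0 > 0
      · simp [h, ih]
      · by_cases hp : p = []
        · simp [h, hp, ih]
        · simp [h, hp, ih]

theorem pvNegIdxs_eq (sig : List (List Int)) :
    ∀ (s : Int),
      ((PySem.List.enumerate sig s).filter
          (fun ir => decide ((PySem.List.pyGet? ir.2 (-1)).getD 0 ≤ 0))).map (fun ir => ir.1)
        = (pvNegs sig).map (fun (k : Nat) => s + (k : Int)) := by
  induction sig with
  | nil => intro s; simp [PySem.List.enumerate_nil, pvNegs]
  | cons r rs ih =>
      intro s
      rw [PySem.List.enumerate_cons]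
      by_cases h : (PySem.List.pyGet? r (-1)).getD 0 > 0
      · have h' : ¬ ((PySem.List.pyGet? r (-1)).getD 0 ≤ 0) := by omega
        rw [List.filter_cons_of_neg (by simpa using h')]
        rw [ih (s + 1)]
        simp only [pvNegs, if_pos h, List.map_map]
        apply List.map_congr_left
        intro k _
        simp only [Function.comp_apply]
        push_cast
        ring
      · have h' : (PySem.List.pyGet? r (-1)).getD 0 ≤ 0 := by omega
        rw [List.filter_cons_of_pos (by simpa using h')]
        simp only [pvNegs, if_neg h, List.map_cons, List.map_map]
        rw [ih (s + 1)]
        refine congrArg₂ List.cons (by simp) ?_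
        apply List.map_congr_left
        intro k _
        simp only [Function.comp_apply]
        push_cast
        ring

theorem pvB_foldl (sig : List (List Int)) :
    ∀ (pre p : List (List Int)) (acc : List (List (List Int))),
      (((pvNegs sig).map (fun k => ((pre.length + p.length + k : Nat) : Int))).foldl
          (peaksplitAltStep (pre ++ p ++ sig)) (((pre.length : Nat) : Int), acc)).2
        = acc ++ pvGroups p sig := by
  induction sig with
  | nil => intro pre p acc; simp [pvNegs, pvGroups]
  | cons r rs ih =>
      intro pre p acc
      by_cases h : (PySem.List.pyGet? r (-1)).getD 0 > 0
      · -- positive row: pending run grows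
        have hmap : (pvNegs (r :: rs)).map (fun k => ((pre.length + p.length + k : Nat) : Int))
            = (pvNegs rs).map (fun k => ((pre.length + (p ++ [r]).length + k : Nat) : Int)) := by
          simp only [pvNegs, if_pos h, List.map_map]
          apply List.map_congr_left
          intro k _
          simp only [Function.comp_apply, List.length_append, List.length_cons,
            List.length_nil]
          congr 1
          omega
        have hfull : pre ++ p ++ (r :: rs) = pre ++ (p ++ [r]) ++ rs := by
          simp
        rw [hmap, hfull, ih pre (p ++ [r]) acc]
        simp only [pvGroups, if_pos h]
      · -- separator row: flush the pending run
        have hnegs : pvNegs (r :: rs) = 0 :: (pvNegs rs).map (· + 1) := by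
          simp [pvNegs, h]
        rw [hnegs]
        simp only [List.map_cons, List.foldl_cons]
        -- first step of the fold
        have hseg : PySem.List.slice (pre ++ p ++ (r :: rs))
            (some ((pre.length : Nat) : Int)) (some ((pre.length + p.length + 0 : Nat) : Int)) = p := by
          rw [PySem.List.slice_natCast]
          have h1 : (pre ++ p ++ (r :: rs)).drop pre.length = p ++ (r :: rs) := by
            rw [List.append_assoc]
            simp
          rw [h1]
          have h2 : pre.length + p.length + 0 - pre.length = p.length := by omega
          rw [h2]
          exact List.take_left ..
        have hstep : peaksplitAltStep (pre ++ p ++ (r :: rs))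
            (((pre.length : Nat) : Int), acc) ((pre.length + p.length + 0 : Nat) : Int)
            = (((pre.length + p.length + 0 : Nat) : Int) + 1,
               if p ≠ [] then acc ++ [p] else acc) := by
          simp only [peaksplitAltStep, hseg]
        rw [hstep]
        -- re-index the remaining separators for the IH with pre' = pre ++ p ++ [r], p' = []
        have hmap : ((pvNegs rs).map (· + 1)).map (fun k => ((pre.length + p.length + k : Nat) : Int))
            = (pvNegs rs).map (fun k => (((pre ++ p ++ [r]).length + ([] : List (List Int)).length + k : Nat) : Int)) := by
          simp only [List.map_map]
          apply List.map_congr_left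
          intro k _
          simp only [Function.comp_apply, List.length_append, List.length_cons,
            List.length_nil]
          congr 1
          omega
        have hstart : ((pre.length + p.length + 0 : Nat) : Int) + 1
            = (((pre ++ p ++ [r]).length : Nat) : Int) := by
          simp
          ring
        have hfull : pre ++ p ++ (r :: rs) = (pre ++ p ++ [r]) ++ ([] : List (List Int)) ++ rs := by
          simp
        rw [hmap, hstart, hfull, ih (pre ++ p ++ [r]) [] (if p ≠ [] then acc ++ [p] else acc)]
        simp only [pvGroups, if_neg h]
        by_cases hp : p = []
        · simp [hp]
        · simp [hp]

-- ===== VERDICT (by name: the statement is the Claim_ definition above) =====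
theorem peaksplit_spec : Claim_equal_peaksplit := by
  intro signal _ _
  unfold Spec_peaksplit peaksplit peaksplit_alt pvNegIdxs
  rw [pvA_foldl signal [] []]
  have h2 := pvB_foldl signal [] [] []
  simp only [List.length_nil, Nat.cast_zero, List.nil_append] at h2
  rw [pvNegIdxs_eq signal 0]
  have h3 : (pvNegs signal).map (fun (k : Nat) => (0 : Int) + (k : Int))
      = (pvNegs signal).map (fun k => ((0 + 0 + k : Nat) : Int)) := by
    apply List.map_congr_left
    intro k _
    simp
  rw [h3]
  simp only [List.nil_append]
  exact h2.symm
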